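-- pv_equiv track=rewrite | github.com/NSMBW-Community/Reggie-Next | libs/lz77.py | CompressionSearch
-- ===== SOURCE A (Python) =====
-- def CompressionSearch(data, offset, totalLength, windowSize=0x1000, maxMatchAmount=18):
--     """
--     Find the longest possible match (in the current window) of the
--     data in "data" (which has total length "length") at offset
--     "offset".
--     Return the offset of the match relative to "offset", and its
--     length.
--     This function is ported from ndspy.
--     """
--
--     if windowSize > offset:
--         windowSize = offset
--     start = offset - windowSize
--
--     if windowSize < maxMatchAmount:
--         maxMatchAmount = windowSize
--     if (totalLength - offset) < maxMatchAmount: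
--         maxMatchAmount = totalLength - offset
--
--     # Strategy: do a binary search of potential match sizes, to
--     # find the longest match that exists in the data.
--
--     lower = 3
--     upper = maxMatchAmount
--
--     recordMatchOffset = recordMatchLen = 0
--     while lower <= upper:
--         # Attempt to find a match at the middle length
--         matchLen = (lower + upper) // 2
--         match = data[offset : offset + matchLen]
--         matchOffset = data.rfind(match, start, offset)
--
--         if matchOffset == -1:
--             # No such match -- any matches will be smaller than this
--             upper = matchLen - 1
--         else:
--             # Match found!
--             if matchLen > recordMatchLen:
--                 recordMatchOffset, recordMatchLen = matchOffset, matchLen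
--             lower = matchLen + 1
--
--     if recordMatchLen == 0:
--         return 0, 0
--     return offset - recordMatchOffset, recordMatchLen
-- ===== SOURCE B (Python) =====
-- def CompressionSearch(data, offset, totalLength, windowSize=0x1000, maxMatchAmount=18):
--     """
--     Find the longest possible match (in the current window) of the
--     data in "data" at offset "offset"; simpler linear scan over
--     candidate lengths, longest first, instead of a binary search.
--     """
--     windowSize = min(windowSize, offset)
--     start = offset - windowSize
--     maxMatchAmount = min(maxMatchAmount, windowSize, totalLength - offset)
--
--     for matchLen in range(maxMatchAmount, 2, -1):
--         matchOffset = data.rfind(data[offset : offset + matchLen], start, offset)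
--         if matchOffset != -1:
--             return offset - matchOffset, matchLen
--
--     return 0, 0
-- ===== Notes on version B (the rewrite author's own statement) =====
-- stated objective: simpler
-- what changed: Replaces the binary search over candidate match lengths with explicit record bookkeeping by a single descending linear scan over lengths (longest first) that returns at the first rfind hit, and replaces the three clamping ifs by min().
import Mathlib
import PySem

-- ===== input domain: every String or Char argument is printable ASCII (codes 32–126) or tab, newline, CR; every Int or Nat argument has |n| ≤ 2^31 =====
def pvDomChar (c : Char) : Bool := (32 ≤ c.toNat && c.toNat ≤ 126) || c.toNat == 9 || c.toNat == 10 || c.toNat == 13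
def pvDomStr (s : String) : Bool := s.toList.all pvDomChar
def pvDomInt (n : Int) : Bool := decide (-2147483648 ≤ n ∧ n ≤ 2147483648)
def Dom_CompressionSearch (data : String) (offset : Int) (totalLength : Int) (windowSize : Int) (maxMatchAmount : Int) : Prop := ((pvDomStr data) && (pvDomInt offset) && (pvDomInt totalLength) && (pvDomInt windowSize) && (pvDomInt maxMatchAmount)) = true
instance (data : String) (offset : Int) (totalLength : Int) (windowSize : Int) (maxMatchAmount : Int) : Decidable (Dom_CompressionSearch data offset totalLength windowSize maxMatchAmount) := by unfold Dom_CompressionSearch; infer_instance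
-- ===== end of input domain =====

-- B replaces A's binary search over match lengths (with record bookkeeping) by a single
-- descending linear scan over lengths that returns at the first hit: simpler, same results.

-- ===== PORT A =====
-- the 'while lower <= upper' binary-search loop of A, state (lower, upper, recordMatchOffset, recordMatchLen)
def pvLoopA (s : String) (offset start lower upper recO recL : Int) : Int × Int :=
  if h : lower ≤ upper then
    let matchLen := PySem.Int.floordiv (lower + upper) 2
    let matchOffset := PySem.Str.rfindFrom s (PySem.Str.slice s (some offset) (some (offset + matchLen))) start (some offset)
    if matchOffset = -1 then
      pvLoopA s offset start lower (matchLen - 1) recO recL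
    else
      if recL < matchLen then
        pvLoopA s offset start (matchLen + 1) upper matchOffset matchLen
      else
        pvLoopA s offset start (matchLen + 1) upper recO recL
  else (recO, recL)
termination_by (upper + 1 - lower).toNat
decreasing_by
  all_goals have hb := PySem.Int.floordiv_two_mid_bounds h
  all_goals omega

def CompressionSearch (data : String) (offset : Int) (totalLength : Int) (windowSize : Int) (maxMatchAmount : Int) : Int × Int :=
  let windowSize := if offset < windowSize then offset else windowSize
  let start := offset - windowSize
  let maxMatchAmount := if windowSize < maxMatchAmount then windowSize else maxMatchAmount
  let maxMatchAmount := if totalLength - offset < maxMatchAmount then totalLength - offset else maxMatchAmount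
  let r := pvLoopA data offset start 3 maxMatchAmount 0 0
  if r.2 = 0 then (0, 0) else (offset - r.1, r.2)

-- ===== PORT B =====
-- the 'for matchLen in range(maxMatchAmount, 2, -1)' scan of B, longest length first
def pvScanB (s : String) (offset start m : Int) : Int × Int :=
  if h : 2 < m then
    let matchOffset := PySem.Str.rfindFrom s (PySem.Str.slice s (some offset) (some (offset + m))) start (some offset)
    if matchOffset ≠ -1 then (offset - matchOffset, m)
    else pvScanB s offset start (m - 1)
  else (0, 0)
termination_by (m - 2).toNat
decreasing_by omega

def CompressionSearch_alt (data : String) (offset : Int) (totalLength : Int) (windowSize : Int) (maxMatchAmount : Int) : Int × Int :=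
  let windowSize := min windowSize offset
  let start := offset - windowSize
  let maxMatchAmount := min maxMatchAmount (min windowSize (totalLength - offset))
  pvScanB data offset start maxMatchAmount

-- ===== PRECONDITION & SPEC =====
def Spec_CompressionSearch (data : String) (offset : Int) (totalLength : Int) (windowSize : Int) (maxMatchAmount : Int) (out : Int × Int) : Prop := out = CompressionSearch_alt data offset totalLength windowSize maxMatchAmount
instance (data : String) (offset : Int) (totalLength : Int) (windowSize : Int) (maxMatchAmount : Int) (out : Int × Int) : Decidable (Spec_CompressionSearch data offset totalLength windowSize maxMatchAmount out) := by unfold Spec_CompressionSearch; infer_instance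

-- ===== CLAIM (what is proved, stated in full; the proofs are below) =====
def Claim_equal_CompressionSearch : Prop := ∀ (data : String) (offset : Int) (totalLength : Int) (windowSize : Int) (maxMatchAmount : Int), Dom_CompressionSearch data offset totalLength windowSize maxMatchAmount → Spec_CompressionSearch data offset totalLength windowSize maxMatchAmount (CompressionSearch data offset totalLength windowSize maxMatchAmount)

-- ===== LEMMAS AND PROOFS =====

-- the rfind call both programs make for candidate length m, and its success predicate
def pvRf (s : String) (offset start m : Int) : Int :=
  PySem.Str.rfindFrom s (PySem.Str.slice s (some offset) (some (offset + m))) start (some offset)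

def pvP (s : String) (offset start m : Int) : Prop := pvRf s offset start m ≠ -1

-- clampIdx is monotone in the index
lemma pvClampIdx_mono (n : ℕ) {i j : ℤ} (h0 : 0 ≤ i) (h : i ≤ j) :
    PySem.List.clampIdx n i ≤ PySem.List.clampIdx n j := by
  simp only [PySem.List.clampIdx, Nat.min_def]
  split_ifs <;> omega

-- a shorter slice data[o:o+m'] is a prefix of the longer data[o:o+m]
lemma pvSlice_prefix (l : List Char) (o : ℤ) {m' m : ℤ} (h0 : 0 ≤ o + m') (h : m' ≤ m) :
    PySem.Chars.slice l (some o) (some (o + m')) <+: PySem.Chars.slice l (some o) (some (o + m)) := by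
  have := pvClampIdx_mono l.length h0 (show o + m' ≤ o + m by omega)
  simp only [PySem.Chars.slice, PySem.List.slice]
  exact List.take_prefix_take_left (by omega)

lemma pvGo_zero (s sub : List Char) :
    PySem.Chars.rfind.go s sub 0 = if sub.isPrefixOf s then 0 else -1 := rfl

lemma pvGo_succ (s sub : List Char) (j : ℕ) :
    PySem.Chars.rfind.go s sub (j + 1)
      = if sub.isPrefixOf (s.drop (j + 1)) then ((j + 1 : ℕ) : ℤ)
        else PySem.Chars.rfind.go s sub j := rfl

lemma pvGo_nonneg (s sub : List Char) (k : ℕ) (h : PySem.Chars.rfind.go s sub k ≠ -1) :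
    0 ≤ PySem.Chars.rfind.go s sub k := by
  induction k with
  | zero =>
    rw [pvGo_zero] at h ⊢
    split_ifs at h ⊢ with hp
    · norm_num
    · exact absurd rfl h
  | succ j ih =>
    rw [pvGo_succ] at h ⊢
    split_ifs at h ⊢ with hp
    · positivity
    · exact ih h

-- rfind.go succeeds on any prefix of a sub it succeeds on
lemma pvGo_mono (s sub sub' : List Char) (k : ℕ) (hpre : sub' <+: sub)
    (h : PySem.Chars.rfind.go s sub k ≠ -1) : PySem.Chars.rfind.go s sub' k ≠ -1 := by
  induction k with
  | zero =>
    rw [pvGo_zero] at h ⊢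
    by_cases h1 : sub.isPrefixOf s
    · have h2 : sub'.isPrefixOf s :=
        List.isPrefixOf_iff_prefix.mpr (hpre.trans (List.isPrefixOf_iff_prefix.mp h1))
      simp [h2]
    · rw [if_neg h1] at h; exact absurd rfl h
  | succ j ih =>
    rw [pvGo_succ] at h ⊢
    by_cases h1 : sub.isPrefixOf (s.drop (j + 1))
    · have h2 : sub'.isPrefixOf (s.drop (j + 1)) :=
        List.isPrefixOf_iff_prefix.mpr (hpre.trans (List.isPrefixOf_iff_prefix.mp h1))
      rw [if_pos h2]; omega
    · rw [if_neg h1] at h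
      by_cases h2 : sub'.isPrefixOf (s.drop (j + 1))
      · rw [if_pos h2]; omega
      · rw [if_neg h2]; exact ih h

-- the normalized end and start bounds rfindFrom computes (independent of the needle)
def pvE (s : List Char) (e? : Option ℤ) : ℤ :=
  match e? with
  | none => s.length
  | some e => if (s.length : ℤ) < e then s.length
              else if e < 0 then (if e + s.length < 0 then 0 else e + s.length) else e

def pvST (s : List Char) (st : ℤ) : ℤ :=
  if st < 0 then (if st + s.length < 0 then 0 else st + s.length) else st

lemma pvST_nonneg (s : List Char) (st : ℤ) : 0 ≤ pvST s st := by
  unfold pvST; split_ifs <;> omega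

lemma pvRfindFrom_def (s sub : List Char) (st : ℤ) (e? : Option ℤ) :
    PySem.Chars.rfindFrom s sub st e?
      = if pvE s e? < pvST s st then -1
        else if PySem.Chars.rfind (List.drop (pvST s st).toNat (List.take (pvE s e?).toNat s)) sub = -1
             then -1
             else pvST s st + PySem.Chars.rfind (List.drop (pvST s st).toNat (List.take (pvE s e?).toNat s)) sub := rfl

-- rfindFrom succeeds on any prefix of a sub it succeeds on (window bounds fixed)
lemma pvRfindFrom_mono (s sub sub' : List Char) (st : ℤ) (e? : Option ℤ) (hpre : sub' <+: sub)
    (h : PySem.Chars.rfindFrom s sub st e? ≠ -1) : PySem.Chars.rfindFrom s sub' st e? ≠ -1 := by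
  rw [pvRfindFrom_def] at h ⊢
  by_cases h1 : pvE s e? < pvST s st
  · rw [if_pos h1] at h; exact absurd rfl h
  · rw [if_neg h1] at h ⊢
    set seg := List.drop (pvST s st).toNat (List.take (pvE s e?).toNat s) with hseg
    by_cases h2 : PySem.Chars.rfind seg sub = -1
    · rw [if_pos h2] at h; exact absurd rfl h
    · have h2' : PySem.Chars.rfind seg sub' ≠ -1 := by
        rw [PySem.Chars.rfind] at h2 ⊢
        exact pvGo_mono _ _ _ _ hpre h2
      rw [if_neg h2']
      have hnn : 0 ≤ PySem.Chars.rfind seg sub' := by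
        rw [PySem.Chars.rfind] at h2' ⊢
        exact pvGo_nonneg _ _ _ h2'
      have := pvST_nonneg s st
      omega

-- the success predicate is monotone: a match of length m gives a match of any shorter length
lemma pvP_mono (s : String) (offset start : ℤ) {m' m : ℤ} (h0 : 0 ≤ offset + m') (hle : m' ≤ m)
    (h : pvP s offset start m) : pvP s offset start m' := by
  unfold pvP pvRf at *
  rw [PySem.Str.rfindFrom_eq] at *
  have hl : (PySem.Str.slice s (some offset) (some (offset + m'))).toList
      <+: (PySem.Str.slice s (some offset) (some (offset + m))).toList := by
    simp only [PySem.Str.slice]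
    simpa using pvSlice_prefix s.toList offset h0 hle
  exact pvRfindFrom_mono _ _ _ _ _ hl h

lemma pvScanB_low (s : String) (offset start m : ℤ) (h : ¬ 2 < m) :
    pvScanB s offset start m = (0, 0) := by
  rw [pvScanB]; simp [h]

lemma pvScanB_hit (s : String) (offset start m : ℤ) (h2 : 2 < m) (hp : pvP s offset start m) :
    pvScanB s offset start m = (offset - pvRf s offset start m, m) := by
  rw [pvScanB]
  unfold pvP pvRf at hp
  simp only [dif_pos h2]
  rw [if_pos hp]
  rfl

-- scanning down over lengths with no match skips them
lemma pvScanB_skip (s : String) (offset start : ℤ) (m m' : ℤ) (hle : m' ≤ m)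
    (hno : ∀ k, m' < k → k ≤ m → ¬ pvP s offset start k) :
    pvScanB s offset start m = pvScanB s offset start m' := by
  obtain ⟨d, hd⟩ : ∃ d : ℕ, m = m' + d := ⟨(m - m').toNat, by omega⟩
  subst hd
  induction d with
  | zero => simp
  | succ j ih =>
    by_cases h2 : 2 < m' + (j + 1 : ℕ)
    · rw [pvScanB]
      have hnp := hno (m' + (j + 1 : ℕ)) (by omega) le_rfl
      unfold pvP pvRf at hnp
      simp only [h2, dif_pos, ne_eq, not_not] at *
      rw [if_neg (by simpa using hnp)]
      have : m' + ((j + 1 : ℕ) : ℤ) - 1 = m' + (j : ℕ) := by push_cast; omega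
      rw [this]
      exact ih (by omega) (fun k hk1 hk2 => hno k hk1 (by push_cast at *; omega))
    · rw [pvScanB_low _ _ _ _ h2, pvScanB_low]
      push_cast at h2 ⊢; omega

-- the binary-search loop of A, post-processed, equals B's descending scan from 'upper'
lemma pvLoopA_eq (s : String) (offset start : ℤ) (lower upper recO recL : ℤ)
    (h3 : 3 ≤ lower) (hup : upper ≤ offset)
    (hinv : (recL = 0 ∧ lower = 3) ∨
      (3 ≤ recL ∧ recL = lower - 1 ∧ recL ≤ upper ∧ pvP s offset start recL ∧
        recO = pvRf s offset start recL)) :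
    (if (pvLoopA s offset start lower upper recO recL).2 = 0 then ((0 : ℤ), (0 : ℤ))
     else (offset - (pvLoopA s offset start lower upper recO recL).1,
           (pvLoopA s offset start lower upper recO recL).2)) =
    pvScanB s offset start upper := by
  by_cases h : lower ≤ upper
  · obtain ⟨hm1, hm2⟩ := PySem.Int.floordiv_two_mid_bounds h
    set matchLen := PySem.Int.floordiv (lower + upper) 2 with hml
    by_cases hp : pvP s offset start matchLen
    · -- match found; the record always advances since recL < lower ≤ matchLen
      have hlt : recL < matchLen := by rcases hinv with ⟨h1, h2⟩ | ⟨h1, h2, _⟩ <;> omega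
      have hstep : pvLoopA s offset start lower upper recO recL
          = pvLoopA s offset start (matchLen + 1) upper (pvRf s offset start matchLen) matchLen := by
        rw [pvLoopA]
        unfold pvP pvRf at hp
        simp only [h, dif_pos, ← hml, if_neg hp, if_pos hlt]
        rfl
      rw [hstep]
      exact pvLoopA_eq s offset start (matchLen + 1) upper _ matchLen (by omega) hup
        (Or.inr ⟨by omega, by omega, by omega, hp, rfl⟩)
    · -- no match at matchLen: nothing in [matchLen, upper] matches either
      have hstep : pvLoopA s offset start lower upper recO recL
          = pvLoopA s offset start lower (matchLen - 1) recO recL := by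
        rw [pvLoopA]
        unfold pvP pvRf at hp
        simp only [ne_eq, not_not] at hp
        simp only [h, dif_pos, ← hml, hp, if_pos]
      rw [hstep]
      rw [pvLoopA_eq s offset start lower (matchLen - 1) recO recL h3 (by omega)
        (by rcases hinv with ⟨h1, h2⟩ | ⟨h1, h2, h4, h5, h6⟩
            · exact Or.inl ⟨h1, h2⟩
            · exact Or.inr ⟨h1, h2, by omega, h5, h6⟩)]
      exact (pvScanB_skip s offset start upper (matchLen - 1) (by omega)
        (fun k hk1 hk2 hpk => hp (pvP_mono s offset start (by omega) (by omega) hpk))).symm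
  · -- loop exit
    have hbase : pvLoopA s offset start lower upper recO recL = (recO, recL) := by
      rw [pvLoopA]; simp [h]
    rw [hbase]
    rcases hinv with ⟨h1, h2⟩ | ⟨h1, h2, h4, h5, h6⟩
    · simp only [h1, if_pos]
      exact (pvScanB_low s offset start upper (by omega)).symm
    · have hu : upper = recL := by omega
      rw [if_neg (by omega), hu, pvScanB_hit s offset start recL (by omega) h5, h6]
termination_by (upper + 1 - lower).toNat
decreasing_by all_goals omega

-- ===== VERDICT (by name: the statement is the Claim_ definition above) =====
theorem CompressionSearch_spec : Claim_equal_CompressionSearch := by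
  intro data offset totalLength windowSize maxMatchAmount _
  unfold Spec_CompressionSearch CompressionSearch CompressionSearch_alt
  dsimp only
  have hw : (if offset < windowSize then offset else windowSize) = min windowSize offset := by
    rw [min_def]; split_ifs <;> omega
  rw [hw]
  have hm : (if totalLength - offset < (if min windowSize offset < maxMatchAmount then min windowSize offset else maxMatchAmount) then totalLength - offset else (if min windowSize offset < maxMatchAmount then min windowSize offset else maxMatchAmount)) = min maxMatchAmount (min (min windowSize offset) (totalLength - offset)) := by
    simp only [min_def]; split_ifs <;> omega
  rw [hm]
  exact pvLoopA_eq data offset (offset - min windowSize offset) 3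
    (min maxMatchAmount (min (min windowSize offset) (totalLength - offset))) 0 0 le_rfl
    (by omega) (Or.inl ⟨rfl, rfl⟩)
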